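-- pv_equiv track=rewrite | github.com/YassineSahli04/Python-projects | Devoir 4/d4.py | matrixMinMax
-- ===== SOURCE A (Python) =====
-- def matrixMinMax(M):
--     max = M[0][0]
--     min = M[0][0]
--     for m in M:
--         for e in m:
--             if e > max:
--                 max = e
--             elif e < min:
--                 min = e
--     tup = (min, max)
--     return tup
-- ===== SOURCE B (Python) =====
-- def matrixMinMax(M):
--     flat = [e for row in M for e in row]
--     return (min(flat), max(flat))
-- ===== Notes on version B (the rewrite author's own statement) =====
-- stated objective: idiomatic
-- what changed: Replaces the manual seeded min/max-tracking double loop by flattening the matrix with a comprehension and calling the built-in min and max.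
import Mathlib
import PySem

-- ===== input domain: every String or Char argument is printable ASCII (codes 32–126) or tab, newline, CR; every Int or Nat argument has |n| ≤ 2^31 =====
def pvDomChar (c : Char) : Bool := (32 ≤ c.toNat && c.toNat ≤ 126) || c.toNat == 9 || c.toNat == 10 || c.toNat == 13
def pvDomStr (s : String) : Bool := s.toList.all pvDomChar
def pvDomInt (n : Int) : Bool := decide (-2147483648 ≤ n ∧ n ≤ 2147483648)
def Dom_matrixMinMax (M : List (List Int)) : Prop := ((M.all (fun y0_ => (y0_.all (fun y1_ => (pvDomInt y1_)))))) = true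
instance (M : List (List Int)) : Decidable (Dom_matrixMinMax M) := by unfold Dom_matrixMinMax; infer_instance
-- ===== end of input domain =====

-- B flattens the matrix and uses built-in min/max instead of A's manual seeded comparison loop (return-value equivalence only).

-- ===== PORT A =====
-- A: max = min = M[0][0]; double loop updating max (elif min); returns (min, max).
def matrixMinMax (M : List (List Int)) : Int × Int :=
  match (PySem.List.pyGet? M 0).bind (fun r => PySem.List.pyGet? r 0) with
  | none => (0, 0)  -- IndexError in Python; excluded by Pre_
  | some a0 =>
    let st := M.foldl (fun (st : Int × Int) m =>
      m.foldl (fun (st : Int × Int) e =>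
        if e > st.1 then (e, st.2)
        else if e < st.2 then (st.1, e)
        else st) st) (a0, a0)
    (st.2, st.1)

-- ===== PORT B =====
def matrixMinMax_alt (M : List (List Int)) : Int × Int :=
  let flat := M.foldl (fun acc row => acc ++ row) []   -- [e for row in M for e in row]
  match PySem.List.min? flat (fun x => x), PySem.List.max? flat (fun x => x) with
  | some mn, some mx => (mn, mx)
  | _, _ => (0, 0)  -- ValueError (min of empty); excluded by Pre_

-- ===== PRECONDITION & SPEC =====
-- A raises IndexError on M[0][0] when M is empty or its first row is empty; those inputs are excluded.
def Pre_matrixMinMax (M : List (List Int)) : Prop := M ≠ [] ∧ M.headD [] ≠ []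
instance (M : List (List Int)) : Decidable (Pre_matrixMinMax M) := by unfold Pre_matrixMinMax; infer_instance
def pvWitness_matrixMinMax : List (List Int) := [[3, -1], [7]]

def Spec_matrixMinMax (M : List (List Int)) (out : Int × Int) : Prop := out = matrixMinMax_alt M
instance (M : List (List Int)) (out : Int × Int) : Decidable (Spec_matrixMinMax M out) := by unfold Spec_matrixMinMax; infer_instance

-- ===== CLAIM (what is proved, stated in full; the proofs are below) =====
def Claim_equal_matrixMinMax : Prop := ∀ (M : List (List Int)), Dom_matrixMinMax M → Pre_matrixMinMax M → Spec_matrixMinMax M (matrixMinMax M)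

-- ===== LEMMAS AND PROOFS =====

-- A's inner step, as a named function.
def pvStep (st : Int × Int) (e : Int) : Int × Int :=
  if e > st.1 then (e, st.2) else if e < st.2 then (st.1, e) else st

-- One row of A's loop tracks (running max, running min), provided min ≤ max.
theorem pvStep_foldl (l : List Int) (mx mn : Int) (h : mn ≤ mx) :
    l.foldl pvStep (mx, mn) = (l.foldl max mx, l.foldl min mn) := by
  induction l generalizing mx mn with
  | nil => rfl
  | cons e t ih =>
    simp only [List.foldl_cons, pvStep]
    split_ifs with h1 h2
    · rw [ih e mn (by omega), max_eq_right (le_of_lt h1), min_eq_left (by omega)]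
    · rw [ih mx e (by omega), max_eq_left (by omega), min_eq_right (by omega)]
    · rw [ih mx mn h, max_eq_left (by omega), min_eq_left (by omega)]

-- A's nested loop equals one loop over the flattened matrix.
theorem pvNested_eq_flatten (M : List (List Int)) (st : Int × Int) :
    M.foldl (fun st m => m.foldl pvStep st) st = M.flatten.foldl pvStep st := by
  induction M generalizing st with
  | nil => rfl
  | cons r t ih => simp [List.foldl_append, ih]

theorem matrixMinMax_spec : Claim_equal_matrixMinMax := by
  intro M _ hpre
  obtain ⟨hM, hr⟩ := hpre
  match M with
  | [] => exact absurd rfl hM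
  | r :: rest =>
    match r with
    | [] => simp at hr
    | a0 :: t =>
      show matrixMinMax ((a0 :: t) :: rest) = matrixMinMax_alt ((a0 :: t) :: rest)
      have hflat : ((a0 :: t) :: rest).foldl (fun acc row => acc ++ row) ([] : List Int)
          = a0 :: (t ++ rest.flatten) := by
        rw [PySem.List.foldl_append_eq_flatten]; simp
      unfold matrixMinMax matrixMinMax_alt
      simp only [hflat, PySem.List.min?_id_cons, PySem.List.max?_id_cons]
      have hget : (PySem.List.pyGet? ((a0 :: t) :: rest) 0).bind
          (fun r => PySem.List.pyGet? r 0) = some a0 := by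
        simp [PySem.List.pyGet?, PySem.List.pyIdx?]
      rw [hget]
      dsimp only
      change ((List.foldl (fun (st : Int × Int) m => m.foldl pvStep st) (a0, a0) ((a0 :: t) :: rest)).2,
              (List.foldl (fun (st : Int × Int) m => m.foldl pvStep st) (a0, a0) ((a0 :: t) :: rest)).1) = (List.foldl min a0 (t ++ rest.flatten), List.foldl max a0 (t ++ rest.flatten))
      rw [pvNested_eq_flatten, show ((a0 :: t) :: rest).flatten = a0 :: (t ++ rest.flatten) by simp,
        pvStep_foldl _ _ _ le_rfl]
      simp [max_self, min_self]

-- ===== VERDICT (by name: the statement is the Claim_ definition above) =====
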